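-- pv_equiv track=rewrite | github.com/cortexuvula/Medical-Assistant | src/core/app.py | _parse_soap_sections
-- ===== SOURCE A (Python) =====
-- from typing import Callable, Optional, Dict, Any, List
--
-- def _parse_soap_sections(content: str) -> Dict[str, str]:
--     """Parse SOAP note content into sections.
--
--     Args:
--         content: Raw SOAP note text
--
--     Returns:
--         Dictionary with subjective, objective, assessment, and plan sections
--     """
--     sections = {
--         'subjective': '',
--         'objective': '',
--         'assessment': '',
--         'plan': ''
--     }
--
--     # Simple parsing - look for section headers
--     lines = content.split('\n')
--     current_section = None
--     section_content = []
--
--     section_headers = {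
--         'subjective': ['subjective:', 's:'],
--         'objective': ['objective:', 'o:'],
--         'assessment': ['assessment:', 'a:'],
--         'plan': ['plan:', 'p:']
--     }
--
--     for line in lines:
--         line_lower = line.lower().strip()
--
--         # Check if this line is a section header
--         new_section = None
--         for section, headers in section_headers.items():
--             if any(line_lower.startswith(header) for header in headers):
--                 new_section = section
--                 break
--
--         if new_section:
--             # Save previous section content
--             if current_section and section_content:
--                 sections[current_section] = '\n'.join(section_content).strip()
--
--             # Start new section
--             current_section = new_section
--             section_content = []
--
--             # Add content after the header on the same line
--             header_text = line.split(':', 1)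
--             if len(header_text) > 1 and header_text[1].strip():
--                 section_content.append(header_text[1].strip())
--         elif current_section:
--             # Add line to current section
--             section_content.append(line)
--
--     # Save last section
--     if current_section and section_content:
--         sections[current_section] = '\n'.join(section_content).strip()
--
--     # If no sections found, put all content in subjective
--     if not any(sections.values()):
--         sections['subjective'] = content
--
--     return sections
-- ===== SOURCE B (Python) =====
-- _HEADER_TABLE = [
--     ('subjective', ('subjective:', 's:')),
--     ('objective', ('objective:', 'o:')),
--     ('assessment', ('assessment:', 'a:')),
--     ('plan', ('plan:', 'p:')),
-- ]
--
--
-- def _header_of(line):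
--     low = line.lower().strip()
--     for section, prefixes in _HEADER_TABLE:
--         if low.startswith(prefixes):
--             return section
--     return None
--
--
-- def _inline(line):
--     parts = line.split(':', 1)
--     if len(parts) > 1 and parts[1].strip():
--         return [parts[1].strip()]
--     return []
--
--
-- def _blocks(lines):
--     """Scan the lines back-to-front, cutting them into (section, block) pairs."""
--     pending = []   # body lines between the current position and the next header
--     blocks = []
--     for line in reversed(lines):
--         sec = _header_of(line)
--         if sec is None:
--             pending = [line] + pending
--         else:
--             blocks = [(sec, _inline(line) + pending)] + blocks
--             pending = []
--     return blocks
--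
--
-- def _parse_soap_sections(content: str):
--     sections = {'subjective': '', 'objective': '', 'assessment': '', 'plan': ''}
--     for sec, block in _blocks(content.split('\n')):
--         if block:
--             sections[sec] = '\n'.join(block).strip()
--     if not any(sections.values()):
--         sections['subjective'] = content
--     return sections
-- ===== Notes on version B (the rewrite author's own statement) =====
-- stated objective: alternative
-- what changed: A's single stateful forward loop with a mutable current-section marker, a pending-content buffer and dict writes interleaved with the scan is replaced by a pure back-to-front scan that first cuts the lines into (section, block) pairs and then folds those pairs into the dict in a separate pass.
import Mathlib
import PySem

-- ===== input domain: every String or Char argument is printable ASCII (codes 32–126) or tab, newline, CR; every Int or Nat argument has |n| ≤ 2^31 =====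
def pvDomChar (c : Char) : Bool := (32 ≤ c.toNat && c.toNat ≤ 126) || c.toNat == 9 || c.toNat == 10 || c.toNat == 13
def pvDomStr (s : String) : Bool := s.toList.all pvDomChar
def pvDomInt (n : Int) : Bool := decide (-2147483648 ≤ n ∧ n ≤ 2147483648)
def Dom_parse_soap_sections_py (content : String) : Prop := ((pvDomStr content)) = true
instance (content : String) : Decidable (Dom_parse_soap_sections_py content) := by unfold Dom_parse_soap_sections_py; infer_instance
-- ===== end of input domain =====

-- B replaces A's single stateful forward loop (mutable current section + pending-content buffer +
-- interleaved dict writes) by a pure back-to-front scan that cuts the lines into (section, block)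
-- pairs first and folds them into the dict afterwards; objective: alternative.

-- ===== PORT A =====
-- shared header test (A's inner loop over the section_headers table, branches in A's order)
def soapHeaderOf (line : String) : Option String :=
  let low := PySem.Str.strip (PySem.Str.lower line)
  if PySem.Str.startswith low "subjective:" || PySem.Str.startswith low "s:" then some "subjective"
  else if PySem.Str.startswith low "objective:" || PySem.Str.startswith low "o:" then some "objective"
  else if PySem.Str.startswith low "assessment:" || PySem.Str.startswith low "a:" then some "assessment"
  else if PySem.Str.startswith low "plan:" || PySem.Str.startswith low "p:" then some "plan"
  else none

-- shared inline-content extraction: line.split(':', 1), keep the tail iff non-empty after strip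
def soapInline (line : String) : List String :=
  match PySem.Str.splitMax? line ":" 1 with
  | some [_, r] => if PySem.Str.strip r ≠ "" then [PySem.Str.strip r] else []
  | _ => []

def soapDict0 : PySem.Dict String String :=
  ((((PySem.Dict.empty).insert "subjective" "").insert "objective" "").insert "assessment" "").insert "plan" ""

-- A's for-loop: state = (sections, current_section, section_content)
def soapLoopA : List String → PySem.Dict String String → Option String → List String →
    PySem.Dict String String × Option String × List String
  | [], d, cur, acc => (d, cur, acc)
  | line :: rest, d, cur, acc =>
    match soapHeaderOf line with
    | some newSection =>
      let d' := match cur with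
        | some c => if acc ≠ [] then d.insert c (PySem.Str.strip (PySem.Str.join "\n" acc)) else d
        | none => d
      soapLoopA rest d' (some newSection) (soapInline line)
    | none =>
      match cur with
      | some _ => soapLoopA rest d cur (acc ++ [line])
      | none => soapLoopA rest d cur acc

def parse_soap_sections_py (content : String) : List (String × String) :=
  let lines := (PySem.Str.split? content "\n").getD []
  let st := soapLoopA lines soapDict0 none []
  -- save last section
  let d := match st.2.1 with
    | some c => if st.2.2 ≠ [] then st.1.insert c (PySem.Str.strip (PySem.Str.join "\n" st.2.2)) else st.1
    | none => st.1
  -- if no sections found, put all content in subjective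
  let d := if d.values.all (fun v => v = "") then d.insert "subjective" content else d
  d.items

-- ===== PORT B =====
-- one backward step: state = (pending body lines below, blocks below)
def soapStep (line : String) (st : List String × List (String × List String)) :
    List String × List (String × List String) :=
  match soapHeaderOf line with
  | none => (line :: st.1, st.2)
  | some sec => ([], (sec, soapInline line ++ st.1) :: st.2)

-- the back-to-front scan of Source B's _blocks ('for line in reversed(lines)' = foldr)
def soapBlocks (lines : List String) : List (String × List String) :=
  (lines.foldr soapStep ([], [])).2

def parse_soap_sections_py_alt (content : String) : List (String × String) :=
  let d := (soapBlocks ((PySem.Str.split? content "\n").getD [])).foldl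
    (fun d p => if p.2 ≠ [] then d.insert p.1 (PySem.Str.strip (PySem.Str.join "\n" p.2)) else d)
    soapDict0
  let d := if d.values.all (fun v => v = "") then d.insert "subjective" content else d
  d.items

-- ===== PRECONDITION & SPEC =====
def Spec_parse_soap_sections_py (content : String) (out : List (String × String)) : Prop := out = parse_soap_sections_py_alt content
instance (content : String) (out : List (String × String)) : Decidable (Spec_parse_soap_sections_py content out) := by unfold Spec_parse_soap_sections_py; infer_instance

-- ===== CLAIM (what is proved, stated in full; the proofs are below) =====
def Claim_equal_parse_soap_sections_py : Prop := ∀ (content : String), Dom_parse_soap_sections_py content → Spec_parse_soap_sections_py content (parse_soap_sections_py content)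

-- ===== LEMMAS AND PROOFS =====

-- the write step B folds with (identical to A's section-save step)
def soapW (d : PySem.Dict String String) (p : String × List String) : PySem.Dict String String :=
  if p.2 ≠ [] then d.insert p.1 (PySem.Str.strip (PySem.Str.join "\n" p.2)) else d

-- A's trailing "save last section" step, applied to the loop's final state
def soapFinish (s : PySem.Dict String String × Option String × List String) : PySem.Dict String String :=
  match s.2.1 with
  | some c => if s.2.2 ≠ [] then s.1.insert c (PySem.Str.strip (PySem.Str.join "\n" s.2.2)) else s.1
  | none => s.1

-- loop invariant, open-section case: the pending buffer acc plus the body lines still below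
-- form the block of the open section, and the remaining blocks are B's scan of the rest
theorem soapLoop_some : ∀ (ls : List String) (d : PySem.Dict String String) (sec : String) (acc : List String),
    soapFinish (soapLoopA ls d (some sec) acc)
      = ((sec, acc ++ (ls.foldr soapStep ([], [])).1) :: (ls.foldr soapStep ([], [])).2).foldl soapW d := by
  intro ls
  induction ls with
  | nil =>
    intro d sec acc
    simp only [soapLoopA, List.foldr_nil, List.append_nil, List.foldl_cons, List.foldl_nil,
      soapFinish, soapW]
  | cons l ls ih =>
    intro d sec acc
    cases hh : soapHeaderOf l with
    | none =>
      simp only [soapLoopA, hh, List.foldr_cons, soapStep]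
      rw [ih]
      simp
    | some sec' =>
      simp only [soapLoopA, hh, List.foldr_cons, soapStep]
      rw [ih]
      simp only [List.foldl_cons, List.append_nil, soapW]

-- loop invariant, no-open-section case (the prefix before the first header is dropped)
theorem soapLoop_none : ∀ (ls : List String) (d : PySem.Dict String String),
    soapFinish (soapLoopA ls d none []) = (ls.foldr soapStep ([], [])).2.foldl soapW d := by
  intro ls
  induction ls with
  | nil => intro d; simp only [soapLoopA, List.foldr_nil, List.foldl_nil, soapFinish]
  | cons l ls ih =>
    intro d
    cases hh : soapHeaderOf l with
    | none =>
      simp only [soapLoopA, hh, List.foldr_cons, soapStep]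
      exact ih d
    | some sec =>
      simp only [soapLoopA, hh, List.foldr_cons, soapStep]
      rw [soapLoop_some]

-- ===== VERDICT (by name: the statement is the Claim_ definition above) =====
theorem parse_soap_sections_py_spec : Claim_equal_parse_soap_sections_py := by
  intro content _
  unfold Spec_parse_soap_sections_py
  exact congrArg
    (fun d : PySem.Dict String String =>
      (if d.values.all (fun v => v = "") then d.insert "subjective" content else d).items)
    (soapLoop_none ((PySem.Str.split? content "\n").getD []) soapDict0)
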